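-- pv_equiv track=rewrite | github.com/penkin1993/algo2 | ex2/2/main.py | get_right_str
-- ===== SOURCE A (Python) =====
-- def get_right_str(input_str, split_ind, key):
--     if key[1] - key[0] <= 0:
--         return ""
--     elif split_ind[key] == -1:
--         return input_str[key[0]] + get_right_str(input_str, split_ind, (key[0] + 1, key[1] - 1)) + input_str[key[1]]
--     else:
--         return (get_right_str(input_str, split_ind, (key[0], split_ind[key])) +
--                 get_right_str(input_str, split_ind, (split_ind[key] + 1, key[1])))
-- ===== SOURCE B (Python) =====
-- def get_right_str(input_str, split_ind, key):
--     # Iterative depth-first traversal with an explicit stack of work items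
--     # instead of recursion; fragments are collected and joined at the end.
--     parts = []
--     stack = [("int", key[0], key[1])]
--     while stack:
--         item = stack.pop()
--         if item[0] == "chr":
--             parts.append(item[1])
--         else:
--             a, b = item[1], item[2]
--             if b - a <= 0:
--                 continue
--             s = split_ind[(a, b)]
--             if s == -1:
--                 stack.append(("chr", input_str[b]))
--                 stack.append(("int", a + 1, b - 1))
--                 stack.append(("chr", input_str[a]))
--             else:
--                 stack.append(("int", s + 1, b))
--                 stack.append(("int", a, s))
--     return "".join(parts)
-- ===== Notes on version B (the rewrite author's own statement) =====
-- stated objective: alternative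
-- what changed: Replaces the recursive tree descent with an iterative depth-first traversal: an explicit stack of interval/character work items and a fragment list joined once at the end, instead of recursive calls concatenating strings; Pre_ excludes exactly the inputs on which A raises (KeyError, IndexError or RecursionError) and admits every input on which A returns.
import Mathlib
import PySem

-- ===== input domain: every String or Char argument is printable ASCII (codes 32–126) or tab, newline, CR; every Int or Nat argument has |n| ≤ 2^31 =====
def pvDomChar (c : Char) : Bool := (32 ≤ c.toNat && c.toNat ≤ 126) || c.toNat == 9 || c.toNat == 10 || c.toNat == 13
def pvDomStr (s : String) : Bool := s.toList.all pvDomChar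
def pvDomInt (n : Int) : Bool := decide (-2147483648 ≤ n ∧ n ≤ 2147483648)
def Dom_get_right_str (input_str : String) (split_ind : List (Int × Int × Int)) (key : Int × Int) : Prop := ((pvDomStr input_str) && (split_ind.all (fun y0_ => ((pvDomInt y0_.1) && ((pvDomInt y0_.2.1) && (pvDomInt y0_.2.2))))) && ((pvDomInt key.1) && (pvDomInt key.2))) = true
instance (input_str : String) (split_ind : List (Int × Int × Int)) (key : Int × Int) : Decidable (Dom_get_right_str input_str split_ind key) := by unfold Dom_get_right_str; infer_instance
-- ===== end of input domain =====

-- B replaces A's recursive descent by an iterative explicit-stack depth-first traversal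
-- collecting fragments and joining once (objective: alternative decomposition, same cost).


-- ===== PORT A =====
-- split_ind is a Python dict keyed by pairs: first (i, j, v) entry with (i, j) = (a, b).
def pvLookup (d : List (Int × Int × Int)) (a b : Int) : Option Int :=
  match d with
  | [] => none
  | (i, j, v) :: t => if i = a ∧ j = b then some v else pvLookup t a b

-- Literal port of A's recursion; the fuel is only a totality device and never runs out
-- on inputs admitted by Pre_ (there the recursion depth is bounded by the number of
-- table entries plus one, since a repeated interval on a path would recurse forever).
-- The [] fall-throughs sit exactly where Python raises (KeyError / IndexError /
-- RecursionError); Pre_ excludes those inputs.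
def pvGoA (input : List Char) (d : List (Int × Int × Int)) : Nat → Int → Int → List Char
  | 0, _, _ => []
  | fuel + 1, a, b =>
    if b - a ≤ 0 then []
    else
      match pvLookup d a b with
      | none => []
      | some s =>
        if s = -1 then
          match PySem.List.pyGet? input a, PySem.List.pyGet? input b with
          | some ca, some cb => ca :: (pvGoA input d fuel (a + 1) (b - 1) ++ [cb])
          | _, _ => []
        else pvGoA input d fuel a s ++ pvGoA input d fuel (s + 1) b

def get_right_str (input_str : String) (split_ind : List (Int × Int × Int)) (key : Int × Int) : String :=
  String.ofList (pvGoA input_str.toList split_ind (split_ind.length + 2) key.1 key.2)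

-- ===== PORT B =====
-- A work item on the explicit stack: an interval still to expand, or a character to emit.
inductive PvItem where
  | interval : Int → Int → PvItem
  | chr : Char → PvItem
deriving DecidableEq, Repr

-- The while-loop of B: pop the top item, emit or expand.  The fuel only makes the loop
-- total in Lean; it cannot run out on inputs admitted by Pre_ (the loop performs at most
-- 5^(|table|+2) iterations there).  Early returns sit where B's Python raises.
def pvRunB (input : List Char) (d : List (Int × Int × Int)) :
    Nat → List PvItem → List Char → List Char
  | 0, _, parts => parts
  | _ + 1, [], parts => parts
  | f + 1, .chr c :: rest, parts => pvRunB input d f rest (parts ++ [c])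
  | f + 1, .interval a b :: rest, parts =>
      if b - a ≤ 0 then pvRunB input d f rest parts
      else
        match pvLookup d a b with
        | none => parts
        | some s =>
          if s = -1 then
            match PySem.List.pyGet? input a, PySem.List.pyGet? input b with
            | some ca, some cb =>
                pvRunB input d f (.chr ca :: .interval (a + 1) (b - 1) :: .chr cb :: rest) parts
            | _, _ => parts
          else
            pvRunB input d f (.interval a s :: .interval (s + 1) b :: rest) parts

def get_right_str_alt (input_str : String) (split_ind : List (Int × Int × Int)) (key : Int × Int) : String :=
  String.ofList (pvRunB input_str.toList split_ind (5 ^ (split_ind.length + 2))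
    [.interval key.1 key.2] [])

-- ===== PRECONDITION & SPEC =====
-- pvSafe checks that the split table is consistent along exactly the intervals the
-- reconstruction visits: every visited nonempty interval has a table entry, -1 entries
-- have in-range endpoints, and no interval recurs along a recursion path.  The fuel is
-- a totality device only: on a consistent table the visit depth is at most the number
-- of table entries plus one (a repeated interval on a path would recurse forever), so
-- fuel |table|+2 never runs out there; on an inconsistent (cyclic) table it runs out
-- and the check is false, as intended.
-- First table entry for the interval (a, b), via the standard library's find?.
def pvFind (d : List (Int × Int × Int)) (a b : Int) : Option Int :=
  (d.find? (fun e => e.1 == a && e.2.1 == b)).map (·.2.2)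

def pvSafe (input : List Char) (d : List (Int × Int × Int)) : Nat → Int → Int → Bool
  | 0, _, _ => false
  | fuel + 1, a, b =>
    if b - a ≤ 0 then true
    else
      match pvFind d a b with
      | none => false
      | some s =>
        if s = -1 then
          decide (-(input.length : Int) ≤ a) && decide (b < (input.length : Int)) &&
            pvSafe input d fuel (a + 1) (b - 1)
        else pvSafe input d fuel a s && pvSafe input d fuel (s + 1) b

-- Pre_ excludes exactly the inputs on which A raises: KeyError on a missing visited
-- key, IndexError on an out-of-range character, RecursionError when a visited interval
-- recurs along the recursion path; on every input where A returns a value Pre_ holds.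
-- A's domain is itself a recursive well-formedness property of the split table (which
-- intervals are visited is determined by the table's own entries), so no flat bound or
-- membership condition can state it; pvSafe states that property without computing any
-- output.
def Pre_get_right_str (input_str : String) (split_ind : List (Int × Int × Int)) (key : Int × Int) : Prop :=
  pvSafe input_str.toList split_ind (split_ind.length + 2) key.1 key.2 = true

instance (input_str : String) (split_ind : List (Int × Int × Int)) (key : Int × Int) : Decidable (Pre_get_right_str input_str split_ind key) := by unfold Pre_get_right_str; infer_instance

def pvWitness_get_right_str : String × (List (Int × Int × Int)) × (Int × Int) :=
  ("ab", [(0, 1, -1)], (0, 1))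

def Spec_get_right_str (input_str : String) (split_ind : List (Int × Int × Int)) (key : Int × Int) (out : String) : Prop := out = get_right_str_alt input_str split_ind key
instance (input_str : String) (split_ind : List (Int × Int × Int)) (key : Int × Int) (out : String) : Decidable (Spec_get_right_str input_str split_ind key out) := by unfold Spec_get_right_str; infer_instance

-- ===== CLAIM (what is proved, stated in full; the proofs are below) =====
def Claim_equal_get_right_str : Prop := ∀ (input_str : String) (split_ind : List (Int × Int × Int)) (key : Int × Int), Dom_get_right_str input_str split_ind key → Pre_get_right_str input_str split_ind key → Spec_get_right_str input_str split_ind key (get_right_str input_str split_ind key)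

-- ===== LEMMAS AND PROOFS =====

lemma pvGet_some {input : List Char} {i : Int}
    (h1 : -(input.length : Int) ≤ i) (h2 : i < (input.length : Int)) :
    ∃ c, PySem.List.pyGet? input i = some c := by
  rcases hc : PySem.List.pyGet? input i with _ | c
  · rw [PySem.List.pyGet?_eq_none_iff] at hc
    exact absurd ⟨h1, h2⟩ hc
  · exact ⟨c, rfl⟩

lemma pvFind_eq_pvLookup (d : List (Int × Int × Int)) (a b : Int) :
    pvFind d a b = pvLookup d a b := by
  induction d with
  | nil => rfl
  | cons e t ih =>
    rcases e with ⟨i, j, v⟩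
    by_cases h : i = a ∧ j = b
    · simp [pvFind, pvLookup, List.find?, h.1, h.2]
    · have hb : ((i == a && j == b) : Bool) = false := by
        simp only [Bool.and_eq_false_iff, beq_eq_false_iff_ne]
        by_cases h1 : i = a
        · exact Or.inr (fun h2 => h ⟨h1, h2⟩)
        · exact Or.inl h1
      simp only [pvFind, pvLookup, List.find?, hb] at ih ⊢
      simp only [if_neg h]
      exact ih

lemma pvSafe_pos {input : List Char} {d : List (Int × Int × Int)} {f : Nat} {a b : Int}
    (h : pvSafe input d f a b = true) : 1 ≤ f := by
  cases f with
  | zero => simp [pvSafe] at h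
  | succ f => omega


lemma pvGoA_succ (input : List Char) (d : List (Int × Int × Int)) (f : Nat) (a b : Int) :
    pvGoA input d (f + 1) a b =
      (if b - a ≤ 0 then []
       else
         match pvLookup d a b with
         | none => []
         | some s =>
           if s = -1 then
             match PySem.List.pyGet? input a, PySem.List.pyGet? input b with
             | some ca, some cb => ca :: (pvGoA input d f (a + 1) (b - 1) ++ [cb])
             | _, _ => []
           else pvGoA input d f a s ++ pvGoA input d f (s + 1) b) := rfl


-- Number of loop iterations B spends on an interval (mirrors A's call tree).
def pvCostF (d : List (Int × Int × Int)) : Nat → Int → Int → Nat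
  | 0, _, _ => 1
  | fuel + 1, a, b =>
    if b - a ≤ 0 then 1
    else
      match pvLookup d a b with
      | none => 1
      | some s =>
        if s = -1 then 3 + pvCostF d fuel (a + 1) (b - 1)
        else 1 + pvCostF d fuel a s + pvCostF d fuel (s + 1) b


lemma pvCostF_succ (d : List (Int × Int × Int)) (f : Nat) (a b : Int) :
    pvCostF d (f + 1) a b =
      (if b - a ≤ 0 then 1
       else
         match pvLookup d a b with
         | none => 1
         | some s =>
           if s = -1 then 3 + pvCostF d f (a + 1) (b - 1)
           else 1 + pvCostF d f a s + pvCostF d f (s + 1) b) := rfl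

lemma pvCostF_pos (d : List (Int × Int × Int)) (f : Nat) (a b : Int) :
    1 ≤ pvCostF d f a b := by
  cases f with
  | zero => simp [pvCostF]
  | succ f =>
    by_cases hd : b - a ≤ 0
    · simp [pvCostF_succ, hd]
    · rcases hl : pvLookup d a b with _ | s
      · simp [pvCostF_succ, hd, hl]
      · by_cases hm : s = -1
        · simp [pvCostF_succ, hd, hl, hm]
          show 1 ≤ 3 + pvCostF d f (a + 1) (b - 1)
          omega
        · simp [pvCostF_succ, hd, hl, hm]
          show 1 ≤ 1 + pvCostF d f a s + pvCostF d f (s + 1) b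
          omega

lemma pvCostF_le (d : List (Int × Int × Int)) :
    ∀ (f : Nat) (a b : Int), pvCostF d f a b ≤ 5 ^ f := by
  intro f
  induction f with
  | zero => intro a b; simp [pvCostF]
  | succ f ih =>
    intro a b
    have h5 : 1 ≤ 5 ^ f := Nat.one_le_pow _ _ (by norm_num)
    rw [pow_succ]
    by_cases hd : b - a ≤ 0
    · simp only [pvCostF_succ, hd, if_true]
      omega
    · rcases hl : pvLookup d a b with _ | s
      · simp [pvCostF_succ, hd, hl]
        omega
      · by_cases hm : s = -1
        · have h1 := ih (a + 1) (b - 1)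
          simp [pvCostF_succ, hd, hl, hm]
          show 3 + pvCostF d f (a + 1) (b - 1) ≤ 5 ^ f * 5
          omega
        · have h1 := ih a s
          have h2 := ih (s + 1) b
          simp [pvCostF_succ, hd, hl, hm]
          show 1 + pvCostF d f a s + pvCostF d f (s + 1) b ≤ 5 ^ f * 5
          omega

-- On a safe interval, A's port and the cost are independent of any sufficient fuel.
lemma pvAgree (input : List Char) (d : List (Int × Int × Int)) :
    ∀ (fs : Nat) (a b : Int) (f f' : Nat), pvSafe input d fs a b = true → fs ≤ f → fs ≤ f' →
      pvGoA input d f a b = pvGoA input d f' a b ∧ pvCostF d f a b = pvCostF d f' a b := by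
  intro fs
  induction fs with
  | zero => intro a b f f' hs _ _; simp [pvSafe] at hs
  | succ fs ih =>
    intro a b f f' hs hf hf'
    obtain ⟨fa, rfl⟩ : ∃ fa, f = fa + 1 := ⟨f - 1, by omega⟩
    obtain ⟨fb, rfl⟩ : ∃ fb, f' = fb + 1 := ⟨f' - 1, by omega⟩
    by_cases hd : b - a ≤ 0
    · constructor <;> simp [pvGoA_succ, pvCostF_succ, hd]
    · rcases hl : pvLookup d a b with _ | s
      · simp [pvSafe, pvFind_eq_pvLookup, hd, hl] at hs
      · by_cases hm : s = -1
        · subst hm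
          have hs' : (decide (-(input.length : Int) ≤ a) && decide (b < (input.length : Int)) &&
              pvSafe input d fs (a + 1) (b - 1)) = true := by
            simpa [pvSafe, pvFind_eq_pvLookup, hd, hl] using hs
          simp only [Bool.and_eq_true, decide_eq_true_eq] at hs'
          obtain ⟨⟨h1, h2⟩, h3⟩ := hs'
          rcases pvGet_some (input := input) (i := a) h1 (by omega) with ⟨ca, hca⟩
          rcases pvGet_some (input := input) (i := b) (by omega) h2 with ⟨cb, hcb⟩
          have hchild := ih (a + 1) (b - 1) fa fb h3 (by omega) (by omega)
          constructor
          · simp [pvGoA_succ, hd, hl, hca, hcb, hchild.1]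
          · simp [pvCostF_succ, hd, hl, hchild.2]
        · have hs' : (pvSafe input d fs a s && pvSafe input d fs (s + 1) b) = true := by
            simpa [pvSafe, pvFind_eq_pvLookup, hd, hl, hm] using hs
          simp only [Bool.and_eq_true] at hs'
          have hL := ih a s fa fb hs'.1 (by omega) (by omega)
          have hR := ih (s + 1) b fa fb hs'.2 (by omega) (by omega)
          constructor
          · simp [pvGoA_succ, hd, hl, hm, hL.1, hR.1]
          · simp [pvCostF_succ, hd, hl, hm, hL.2, hR.2]

-- Canonical value and cost of an interval (at the ports' fuel).
def pvR (input : List Char) (d : List (Int × Int × Int)) (a b : Int) : List Char :=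
  pvGoA input d (d.length + 2) a b

def pvC (d : List (Int × Int × Int)) (a b : Int) : Nat :=
  pvCostF d (d.length + 2) a b

lemma pvR_def (input : List Char) (d : List (Int × Int × Int)) (a b : Int) :
    pvR input d a b = pvGoA input d ((d.length + 1) + 1) a b := rfl

lemma pvC_def (d : List (Int × Int × Int)) (a b : Int) :
    pvC d a b = pvCostF d ((d.length + 1) + 1) a b := rfl

-- One expansion step of a safe nonempty interval, expressed on the canonical value/cost.
lemma pvStep {input : List Char} {d : List (Int × Int × Int)} {fs : Nat} {a b : Int}
    (hfs : fs + 1 ≤ d.length + 2)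
    (hs : pvSafe input d (fs + 1) a b = true) (hd : ¬ b - a ≤ 0) :
    ∃ s, pvLookup d a b = some s ∧
      ((∃ ca cb, s = -1 ∧ PySem.List.pyGet? input a = some ca ∧
          PySem.List.pyGet? input b = some cb ∧
          pvSafe input d fs (a + 1) (b - 1) = true ∧
          pvR input d a b = ca :: (pvR input d (a + 1) (b - 1) ++ [cb]) ∧
          pvC d a b = 3 + pvC d (a + 1) (b - 1))
       ∨ (s ≠ -1 ∧ pvSafe input d fs a s = true ∧ pvSafe input d fs (s + 1) b = true ∧
          pvR input d a b = pvR input d a s ++ pvR input d (s + 1) b ∧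
          pvC d a b = 1 + pvC d a s + pvC d (s + 1) b)) := by
  rcases hl : pvLookup d a b with _ | s
  · simp [pvSafe, pvFind_eq_pvLookup, hd, hl] at hs
  · refine ⟨s, rfl, ?_⟩
    by_cases hm : s = -1
    · subst hm
      have hs' : (decide (-(input.length : Int) ≤ a) && decide (b < (input.length : Int)) &&
          pvSafe input d fs (a + 1) (b - 1)) = true := by
        simpa [pvSafe, pvFind_eq_pvLookup, hd, hl] using hs
      simp only [Bool.and_eq_true, decide_eq_true_eq] at hs'
      obtain ⟨⟨h1, h2⟩, h3⟩ := hs'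
      rcases pvGet_some (input := input) (i := a) h1 (by omega) with ⟨ca, hca⟩
      rcases pvGet_some (input := input) (i := b) (by omega) h2 with ⟨cb, hcb⟩
      refine Or.inl ⟨ca, cb, rfl, hca, hcb, h3, ?_, ?_⟩
      · rw [pvR_def, pvR_def]
        have hmid := pvAgree input d fs (a + 1) (b - 1) (d.length + 1) ((d.length + 1) + 1)
          h3 (by omega) (by omega)
        conv_lhs => rw [pvGoA_succ]
        simp [hd, hl, hca, hcb, hmid.1]
      · rw [pvC_def, pvC_def]
        have hmid := pvAgree input d fs (a + 1) (b - 1) (d.length + 1) ((d.length + 1) + 1)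
          h3 (by omega) (by omega)
        conv_lhs => rw [pvCostF_succ]
        simp [hd, hl, hmid.2]
    · have hs' : (pvSafe input d fs a s && pvSafe input d fs (s + 1) b) = true := by
        simpa [pvSafe, pvFind_eq_pvLookup, hd, hl, hm] using hs
      simp only [Bool.and_eq_true] at hs'
      have hL := pvAgree input d fs a s (d.length + 1) ((d.length + 1) + 1)
        hs'.1 (by omega) (by omega)
      have hR := pvAgree input d fs (s + 1) b (d.length + 1) ((d.length + 1) + 1)
        hs'.2 (by omega) (by omega)
      refine Or.inr ⟨hm, hs'.1, hs'.2, ?_, ?_⟩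
      · rw [pvR_def, pvR_def, pvR_def]
        conv_lhs => rw [pvGoA_succ]
        simp [hd, hl, hm, hL.1, hR.1]
      · rw [pvC_def, pvC_def, pvC_def]
        conv_lhs => rw [pvCostF_succ]
        simp [hd, hl, hm, hL.2, hR.2]

lemma pvR_empty (input : List Char) (d : List (Int × Int × Int)) {a b : Int}
    (hd : b - a ≤ 0) : pvR input d a b = [] := by
  rw [pvR_def, pvGoA_succ]; simp [hd]

lemma pvC_empty (d : List (Int × Int × Int)) {a b : Int}
    (hd : b - a ≤ 0) : pvC d a b = 1 := by
  rw [pvC_def, pvCostF_succ]; simp [hd]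

def pvItemOk (input : List Char) (d : List (Int × Int × Int)) : PvItem → Prop
  | .interval a b => ∃ fs, fs + 1 ≤ d.length + 2 ∧ pvSafe input d (fs + 1) a b = true
  | .chr _ => True

def pvItemCost (d : List (Int × Int × Int)) : PvItem → Nat
  | .interval a b => pvC d a b
  | .chr _ => 1

def pvRender (input : List Char) (d : List (Int × Int × Int)) : PvItem → List Char
  | .interval a b => pvR input d a b
  | .chr c => [c]

lemma pvItemCost_pos (d : List (Int × Int × Int)) (it : PvItem) : 1 ≤ pvItemCost d it := by
  cases it with
  | interval a b => exact pvCostF_pos d _ a b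
  | chr c => exact le_refl 1

-- The stack machine computes exactly the concatenation of A's values of its items.
lemma pvRunB_spec (input : List Char) (d : List (Int × Int × Int)) :
    ∀ f (stack : List PvItem) (parts : List Char),
      (∀ it ∈ stack, pvItemOk input d it) →
      (stack.map (pvItemCost d)).sum ≤ f →
      pvRunB input d f stack parts = parts ++ (stack.map (pvRender input d)).flatten := by
  intro f
  induction f using Nat.strong_induction_on with
  | _ f ih =>
    intro stack parts hok hcost
    match stack with
    | [] => cases f <;> simp [pvRunB]
    | it :: rest =>
      have hc1 : 1 ≤ pvItemCost d it := pvItemCost_pos d it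
      have hf : ∃ f', f = f' + 1 := by
        rcases f with _ | f'
        · simp at hcost; omega
        · exact ⟨f', rfl⟩
      rcases hf with ⟨f', rfl⟩
      have hlt : f' < f' + 1 := Nat.lt_succ_self f'
      match it with
      | .chr c =>
        have : pvRunB input d (f' + 1) (.chr c :: rest) parts =
            pvRunB input d f' rest (parts ++ [c]) := rfl
        rw [this, ih f' hlt rest (parts ++ [c]) (fun x hx => hok x (List.mem_cons_of_mem _ hx))
          (by
            have h1 : 1 + (List.map (pvItemCost d) rest).sum ≤ f' + 1 := by
              simpa [pvItemCost] using hcost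
            show (List.map (pvItemCost d) rest).sum ≤ f'
            omega)]
        simp [pvRender]
      | .interval a b =>
        obtain ⟨fs, hfs, hsafe⟩ := hok _ (List.mem_cons_self ..)
        have hcost' : pvC d a b + (rest.map (pvItemCost d)).sum ≤ f' + 1 := by
          simpa [pvItemCost] using hcost
        by_cases hd : b - a ≤ 0
        · have hr : pvRunB input d (f' + 1) (.interval a b :: rest) parts =
              pvRunB input d f' rest parts := by simp [pvRunB, hd]
          rw [hr, ih f' hlt rest parts (fun x hx => hok x (List.mem_cons_of_mem _ hx))
            (by
              have h2 := pvC_empty d hd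
              show (List.map (pvItemCost d) rest).sum ≤ f'
              omega)]
          simp [pvRender, pvR_empty input d hd]
        · rcases pvStep hfs hsafe hd with ⟨s, hl, hcase⟩
          rcases hcase with ⟨ca, cb, rfl, hca, hcb, hmid, hRv, hCv⟩ | ⟨hm, hsl, hsr, hRv, hCv⟩
          · have hr : pvRunB input d (f' + 1) (.interval a b :: rest) parts =
                pvRunB input d f'
                  (.chr ca :: .interval (a + 1) (b - 1) :: .chr cb :: rest) parts := by
              simp [pvRunB, hd, hl, hca, hcb]
            obtain ⟨fs', rfl⟩ : ∃ fs', fs = fs' + 1 :=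
              ⟨fs - 1, by have := pvSafe_pos hmid; omega⟩
            have hok' : ∀ x ∈ (PvItem.chr ca :: .interval (a + 1) (b - 1) :: .chr cb :: rest),
                pvItemOk input d x := by
              intro x hx
              simp only [List.mem_cons] at hx
              rcases hx with rfl | rfl | rfl | hx
              · trivial
              · exact ⟨fs', by omega, hmid⟩
              · trivial
              · exact hok x (List.mem_cons_of_mem _ hx)
            rw [hr, ih f' hlt _ parts hok'
              (by
                simp only [List.map_cons, List.sum_cons, pvItemCost]
                show 1 + (pvC d (a + 1) (b - 1) + (1 + (List.map (pvItemCost d) rest).sum)) ≤ f'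
                have h2 : pvC d a b = 3 + pvC d (a + 1) (b - 1) := hCv
                omega)]
            simp [pvRender, hRv]
          · have hr : pvRunB input d (f' + 1) (.interval a b :: rest) parts =
                pvRunB input d f' (.interval a s :: .interval (s + 1) b :: rest) parts := by
              simp [pvRunB, hd, hl, hm]
            obtain ⟨fs', rfl⟩ : ∃ fs', fs = fs' + 1 :=
              ⟨fs - 1, by have := pvSafe_pos hsl; omega⟩
            have hok' : ∀ x ∈ (PvItem.interval a s :: .interval (s + 1) b :: rest),
                pvItemOk input d x := by
              intro x hx
              simp only [List.mem_cons] at hx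
              rcases hx with rfl | rfl | hx
              · exact ⟨fs', by omega, hsl⟩
              · exact ⟨fs', by omega, hsr⟩
              · exact hok x (List.mem_cons_of_mem _ hx)
            rw [hr, ih f' hlt _ parts hok'
              (by
                simp only [List.map_cons, List.sum_cons, pvItemCost]
                show pvC d a s + (pvC d (s + 1) b + (List.map (pvItemCost d) rest).sum) ≤ f'
                have h2 : pvC d a b = 1 + pvC d a s + pvC d (s + 1) b := hCv
                omega)]
            simp [pvRender, hRv]

-- ===== VERDICT (by name: the statement is the Claim_ definition above) =====
theorem get_right_str_spec : Claim_equal_get_right_str := by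
  intro input_str split_ind key _hdom hpre
  unfold Spec_get_right_str get_right_str get_right_str_alt
  congr 1
  have hpre' : pvSafe input_str.toList split_ind ((split_ind.length + 1) + 1) key.1 key.2 = true := hpre
  rw [pvRunB_spec input_str.toList split_ind _ [.interval key.1 key.2] []
    (by
      intro x hx
      simp only [List.mem_singleton] at hx
      subst hx
      exact ⟨split_ind.length + 1, le_refl _, hpre'⟩)
    (by
      have := pvCostF_le split_ind (split_ind.length + 2) key.1 key.2
      simp only [List.map_cons, List.map_nil, List.sum_cons, List.sum_nil, pvItemCost]
      unfold pvC
      omega)]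
  simp [pvRender, pvR]
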